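-- pv_equiv track=rewrite | github.com/imnuman/trading-tool | src/risk/correlation_manager.py | _get_base_currency
-- ===== SOURCE A (Python) =====
-- from typing import Dict, List, Optional, Set
--
-- def _get_base_currency(pair: str, direction: str) -> Optional[str]:
--     """
--     Get base currency being bought/sold
--
--     Args:
--         pair: Trading pair (e.g., 'EURUSD')
--         direction: 'buy' or 'sell'
--
--     Returns:
--         Base currency being bought
--     """
--     pair = pair.upper()
--     currencies = ['EUR', 'GBP', 'USD', 'JPY', 'AUD', 'CAD', 'CHF', 'NZD']
--
--     for curr in currencies:
--         if pair.startswith(curr):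
--             if direction == 'buy':
--                 return curr  # Buying base currency
--             else:
--                 # Selling base = buying quote
--                 remaining = pair[len(curr):]
--                 for curr2 in currencies:
--                     if remaining.startswith(curr2):
--                         return curr2
--                 break
--             break
--
--     return None
-- ===== SOURCE B (Python) =====
-- _CURRENCIES = {'EUR', 'GBP', 'USD', 'JPY', 'AUD', 'CAD', 'CHF', 'NZD'}
--
-- def _get_base_currency(pair: str, direction: str):
--     """All currency codes are 3 letters, so the startswith scans reduce to
--     fixed-position slicing plus set membership."""
--     pair = pair.upper()
--     base = pair[:3]
--     if base not in _CURRENCIES: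
--         return None
--     if direction == 'buy':
--         return base
--     quote = pair[3:6]
--     return quote if quote in _CURRENCIES else None
-- ===== Notes on version B (the rewrite author's own statement) =====
-- stated objective: simpler
-- what changed: Both linear startswith-scans over the currency list are removed: since every code is exactly 3 letters, B slices pair.upper() at fixed positions [:3] and [3:6] and tests set membership, with no loops at all.
import Mathlib
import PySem

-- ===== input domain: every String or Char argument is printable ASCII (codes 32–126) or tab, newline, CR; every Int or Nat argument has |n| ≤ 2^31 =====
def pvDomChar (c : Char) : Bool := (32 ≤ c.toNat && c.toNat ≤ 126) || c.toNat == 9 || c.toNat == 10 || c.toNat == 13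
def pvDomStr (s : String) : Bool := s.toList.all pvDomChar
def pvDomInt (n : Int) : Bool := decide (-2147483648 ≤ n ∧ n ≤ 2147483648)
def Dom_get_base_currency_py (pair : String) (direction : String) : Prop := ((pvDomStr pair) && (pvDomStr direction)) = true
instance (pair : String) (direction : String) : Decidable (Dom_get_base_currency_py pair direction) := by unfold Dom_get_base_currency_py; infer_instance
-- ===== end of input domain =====

-- B replaces A's two startswith-scans over the currency list by fixed-position
-- slicing ([:3], [3:6]) plus set membership (objective: simpler, no loops).

-- ===== PORT A =====
-- the literal `currencies` list of A
def pvCurrenciesA : List String := ["EUR", "GBP", "USD", "JPY", "AUD", "CAD", "CHF", "NZD"]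

-- A's inner loop: `for curr2 in currencies: if remaining.startswith(curr2): return curr2`
def pvInnerLoopA (cs : List String) (remaining : String) : Option String :=
  match cs with
  | [] => none
  | c2 :: rest =>
    if PySem.Str.startswith remaining c2 then some c2 else pvInnerLoopA rest remaining

-- A's outer loop over `currencies` (the trailing `break`s make a miss return None)
def pvOuterLoopA (cs : List String) (pair : String) (direction : String) : Option String :=
  match cs with
  | [] => none
  | c :: rest =>
    if PySem.Str.startswith pair c then
      if direction = "buy" then some c
      else pvInnerLoopA pvCurrenciesA (PySem.Str.slice pair (some (PySem.Str.len c)) none)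
    else pvOuterLoopA rest pair direction

def get_base_currency_py (pair : String) (direction : String) : Option String :=
  pvOuterLoopA pvCurrenciesA (PySem.Str.upper pair) direction

-- ===== PORT B =====
-- the `_CURRENCIES` set of B
def pvCurrencySetB : PySem.Set String :=
  PySem.Set.ofList ["EUR", "GBP", "USD", "JPY", "AUD", "CAD", "CHF", "NZD"]

def get_base_currency_py_alt (pair : String) (direction : String) : Option String :=
  let p := PySem.Str.upper pair
  let base := PySem.Str.slice p none (some 3)
  if base ∈ pvCurrencySetB then
    if direction = "buy" then some base
    else
      let quote := PySem.Str.slice p (some 3) (some 6)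
      if quote ∈ pvCurrencySetB then some quote else none
  else none

-- ===== PRECONDITION & SPEC =====
def Spec_get_base_currency_py (pair : String) (direction : String) (out : Option String) : Prop := out = get_base_currency_py_alt pair direction
instance (pair : String) (direction : String) (out : Option String) : Decidable (Spec_get_base_currency_py pair direction out) := by unfold Spec_get_base_currency_py; infer_instance

-- ===== CLAIM (what is proved, stated in full; the proofs are below) =====
def Claim_equal_get_base_currency_py : Prop := ∀ (pair : String) (direction : String), Dom_get_base_currency_py pair direction → Spec_get_base_currency_py pair direction (get_base_currency_py pair direction)

-- ===== LEMMAS AND PROOFS =====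

-- a 3-letter prefix test is a fixed-position slice comparison
theorem pv_startswith3 (s c : String) (h3 : c.toList.length = 3) :
    PySem.Str.startswith s c = true ↔ PySem.Str.slice s none (some 3) = c := by
  rw [PySem.Str.startswith_eq, PySem.Chars.startswith_iff, List.prefix_iff_eq_take, h3,
      ← String.toList_inj, PySem.Str.toList_slice, PySem.Chars.slice_eq_listSlice,
      PySem.List.slice_to s.toList (by norm_num)]
  constructor <;> intro h <;> simpa using h.symm

-- a 3-letter prefix test on the remainder p[3:] is the [3:6] slice comparison
theorem pv_startswith3q (p c : String) (h3 : c.toList.length = 3) :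
    PySem.Str.startswith (PySem.Str.slice p (some 3) none) c = true ↔
      PySem.Str.slice p (some 3) (some 6) = c := by
  rw [PySem.Str.startswith_eq, PySem.Chars.startswith_iff, List.prefix_iff_eq_take, h3,
      ← String.toList_inj, PySem.Str.toList_slice, PySem.Str.toList_slice,
      PySem.Chars.slice_eq_listSlice, PySem.Chars.slice_eq_listSlice,
      PySem.List.slice_from p.toList (by norm_num),
      show PySem.List.slice p.toList (some 3) (some 6) = ((p.toList.drop 3).take 3) from
        PySem.List.slice_natCast p.toList 3 6]
  constructor <;> intro h <;> simpa using h.symm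

-- membership in B's currency set, spelled out
theorem pv_memSet (t : String) :
    t ∈ pvCurrencySetB ↔ (t = "EUR" ∨ t = "GBP" ∨ t = "USD" ∨ t = "JPY" ∨ t = "AUD" ∨ t = "CAD" ∨ t = "CHF" ∨ t = "NZD") := by
  rw [show pvCurrencySetB = PySem.Set.ofList pvCurrenciesA from rfl, PySem.Set.mem_ofList]
  simp [pvCurrenciesA]

-- A's inner scan returns the [3:6] slice iff that slice is a currency
set_option maxHeartbeats 2000000 in
theorem pv_inner_eq (p : String) :
    pvInnerLoopA pvCurrenciesA (PySem.Str.slice p (some 3) none) =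
      (if PySem.Str.slice p (some 3) (some 6) ∈ pvCurrencySetB
       then some (PySem.Str.slice p (some 3) (some 6)) else none) := by
  have eq0 : (PySem.Str.startswith (PySem.Str.slice p (some 3) none) "EUR" = true) ↔ (PySem.Str.slice p (some 3) (some 6) = "EUR") := pv_startswith3q p "EUR" (by decide)
  have eq1 : (PySem.Str.startswith (PySem.Str.slice p (some 3) none) "GBP" = true) ↔ (PySem.Str.slice p (some 3) (some 6) = "GBP") := pv_startswith3q p "GBP" (by decide)
  have eq2 : (PySem.Str.startswith (PySem.Str.slice p (some 3) none) "USD" = true) ↔ (PySem.Str.slice p (some 3) (some 6) = "USD") := pv_startswith3q p "USD" (by decide)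
  have eq3 : (PySem.Str.startswith (PySem.Str.slice p (some 3) none) "JPY" = true) ↔ (PySem.Str.slice p (some 3) (some 6) = "JPY") := pv_startswith3q p "JPY" (by decide)
  have eq4 : (PySem.Str.startswith (PySem.Str.slice p (some 3) none) "AUD" = true) ↔ (PySem.Str.slice p (some 3) (some 6) = "AUD") := pv_startswith3q p "AUD" (by decide)
  have eq5 : (PySem.Str.startswith (PySem.Str.slice p (some 3) none) "CAD" = true) ↔ (PySem.Str.slice p (some 3) (some 6) = "CAD") := pv_startswith3q p "CAD" (by decide)
  have eq6 : (PySem.Str.startswith (PySem.Str.slice p (some 3) none) "CHF" = true) ↔ (PySem.Str.slice p (some 3) (some 6) = "CHF") := pv_startswith3q p "CHF" (by decide)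
  have eq7 : (PySem.Str.startswith (PySem.Str.slice p (some 3) none) "NZD" = true) ↔ (PySem.Str.slice p (some 3) (some 6) = "NZD") := pv_startswith3q p "NZD" (by decide)
  simp only [pvInnerLoopA, pvCurrenciesA, pv_memSet, eq0, eq1, eq2, eq3, eq4, eq5, eq6, eq7]
  split_ifs <;> simp_all

-- the main equivalence, stated on the uppercased string
set_option maxHeartbeats 2000000 in
theorem pv_main (p direction : String) :
    pvOuterLoopA pvCurrenciesA p direction =
      (let base := PySem.Str.slice p none (some 3)
       if base ∈ pvCurrencySetB then
         if direction = "buy" then some base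
         else
           let quote := PySem.Str.slice p (some 3) (some 6)
           if quote ∈ pvCurrencySetB then some quote else none
       else none) := by
  have eb0 : (PySem.Str.startswith p "EUR" = true) ↔ (PySem.Str.slice p none (some 3) = "EUR") := pv_startswith3 p "EUR" (by decide)
  have eb1 : (PySem.Str.startswith p "GBP" = true) ↔ (PySem.Str.slice p none (some 3) = "GBP") := pv_startswith3 p "GBP" (by decide)
  have eb2 : (PySem.Str.startswith p "USD" = true) ↔ (PySem.Str.slice p none (some 3) = "USD") := pv_startswith3 p "USD" (by decide)
  have eb3 : (PySem.Str.startswith p "JPY" = true) ↔ (PySem.Str.slice p none (some 3) = "JPY") := pv_startswith3 p "JPY" (by decide)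
  have eb4 : (PySem.Str.startswith p "AUD" = true) ↔ (PySem.Str.slice p none (some 3) = "AUD") := pv_startswith3 p "AUD" (by decide)
  have eb5 : (PySem.Str.startswith p "CAD" = true) ↔ (PySem.Str.slice p none (some 3) = "CAD") := pv_startswith3 p "CAD" (by decide)
  have eb6 : (PySem.Str.startswith p "CHF" = true) ↔ (PySem.Str.slice p none (some 3) = "CHF") := pv_startswith3 p "CHF" (by decide)
  have eb7 : (PySem.Str.startswith p "NZD" = true) ↔ (PySem.Str.slice p none (some 3) = "NZD") := pv_startswith3 p "NZD" (by decide)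
  have hl0 : PySem.Str.len ("EUR" : String) = 3 := by decide
  have hl1 : PySem.Str.len ("GBP" : String) = 3 := by decide
  have hl2 : PySem.Str.len ("USD" : String) = 3 := by decide
  have hl3 : PySem.Str.len ("JPY" : String) = 3 := by decide
  have hl4 : PySem.Str.len ("AUD" : String) = 3 := by decide
  have hl5 : PySem.Str.len ("CAD" : String) = 3 := by decide
  have hl6 : PySem.Str.len ("CHF" : String) = 3 := by decide
  have hl7 : PySem.Str.len ("NZD" : String) = 3 := by decide
  have hinner := pv_inner_eq p
  simp only [pvCurrenciesA] at hinner
  simp only [pvOuterLoopA, pvCurrenciesA, hl0, hl1, hl2, hl3, hl4, hl5, hl6, hl7,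
    hinner, pv_memSet, eb0, eb1, eb2, eb3, eb4, eb5, eb6, eb7]
  split_ifs <;> simp_all

-- ===== VERDICT (by name: the statement is the Claim_ definition above) =====
theorem get_base_currency_py_spec : Claim_equal_get_base_currency_py := by
  intro pair direction _
  unfold Spec_get_base_currency_py get_base_currency_py get_base_currency_py_alt
  exact pv_main (PySem.Str.upper pair) direction
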